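-- pv_equiv track=rewrite | github.com/aburns4/MoTIF | task_automation/seq2act/motif_data_generation/all_in_one_motif_preprocess.py | remove_to_keep
-- ===== SOURCE A (Python) =====
-- def remove_to_keep(idxs, total_obj):
--     # convert slices of duplicates to the slices we want to keep
--     # it's just easier this way
--     keep_slices = []
--     begin_slice = [0, idxs[0][0]]
--     keep_slices.append(begin_slice)
--     for i in range(len(idxs) - 1):
--         curr_slice = idxs[i]
--         next_slice = idxs[i + 1]
--         keep_slices.append([curr_slice[1], next_slice[0]])
--     end_slice = [idxs[-1][1], total_obj]
--     keep_slices.append(end_slice)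
--     return keep_slices
-- ===== SOURCE B (Python) =====
-- def remove_to_keep(idxs, total_obj):
--     # Flatten all boundary points, then re-chunk into consecutive pairs.
--     points = [0]
--     for s in idxs:
--         points.append(s[0])
--         points.append(s[1])
--     points.append(total_obj)
--     return [[points[i], points[i + 1]] for i in range(0, len(points), 2)]
-- ===== Notes on version B (the rewrite author's own statement) =====
-- stated objective: alternative
-- what changed: B flattens all slice endpoints (0, each slice's two bounds, total_obj) into one flat boundary list and re-chunks it into consecutive pairs, instead of A's sliding window over consecutive slice pairs with separate begin/end cases.
import Mathlib
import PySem

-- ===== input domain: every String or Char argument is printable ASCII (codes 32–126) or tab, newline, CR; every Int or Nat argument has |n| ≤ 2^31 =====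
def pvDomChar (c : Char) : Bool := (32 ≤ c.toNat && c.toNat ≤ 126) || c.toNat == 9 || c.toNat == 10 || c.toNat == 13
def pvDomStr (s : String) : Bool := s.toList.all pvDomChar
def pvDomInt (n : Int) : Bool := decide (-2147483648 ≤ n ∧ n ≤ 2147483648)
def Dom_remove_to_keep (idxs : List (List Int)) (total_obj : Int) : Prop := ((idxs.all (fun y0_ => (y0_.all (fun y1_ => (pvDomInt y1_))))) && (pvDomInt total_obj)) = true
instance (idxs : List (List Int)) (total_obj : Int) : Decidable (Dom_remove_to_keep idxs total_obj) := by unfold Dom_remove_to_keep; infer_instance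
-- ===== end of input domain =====

-- B replaces A's sliding window over consecutive slice pairs by flattening all boundary
-- points into one list and re-chunking it into consecutive pairs (objective: alternative).

-- ===== PORT A =====
def remove_to_keep (idxs : List (List Int)) (total_obj : Int) : List (List Int) :=
  -- keep_slices = []; keep_slices.append([0, idxs[0][0]])
  let keep_slices : List (List Int) :=
    [[0, PySem.List.pyGetD (PySem.List.pyGetD idxs 0 []) 0 0]]
  -- for i in range(len(idxs) - 1): keep_slices.append([idxs[i][1], idxs[i+1][0]])
  let keep_slices :=
    (PySem.List.pyRange 0 ((idxs.length : Int) - 1) 1).foldl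
      (fun acc i =>
        acc ++ [[PySem.List.pyGetD (PySem.List.pyGetD idxs i []) 1 0,
                 PySem.List.pyGetD (PySem.List.pyGetD idxs (i + 1) []) 0 0]])
      keep_slices
  -- keep_slices.append([idxs[-1][1], total_obj])
  keep_slices ++ [[PySem.List.pyGetD (PySem.List.pyGetD idxs (-1) []) 1 0, total_obj]]

-- ===== PORT B =====
def remove_to_keep_alt (idxs : List (List Int)) (total_obj : Int) : List (List Int) :=
  -- points = [0]; for s in idxs: points.append(s[0]); points.append(s[1])
  let points :=
    idxs.foldl
      (fun acc s => acc ++ [PySem.List.pyGetD s 0 0, PySem.List.pyGetD s 1 0]) [0]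
  -- points.append(total_obj)
  let points := points ++ [total_obj]
  -- [[points[i], points[i+1]] for i in range(0, len(points), 2)]
  (PySem.List.pyRange 0 (points.length : Int) 2).map
    (fun i => [PySem.List.pyGetD points i 0, PySem.List.pyGetD points (i + 1) 0])

-- ===== PRECONDITION & SPEC =====
-- Pre_ is exactly where the Python A returns: it raises IndexError on empty idxs
-- (idxs[0]) and on any slice with fewer than two elements.
def Pre_remove_to_keep (idxs : List (List Int)) (total_obj : Int) : Prop :=
  idxs ≠ [] ∧ ∀ s ∈ idxs, 2 ≤ s.length
instance (idxs : List (List Int)) (total_obj : Int) : Decidable (Pre_remove_to_keep idxs total_obj) := by unfold Pre_remove_to_keep; infer_instance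

def pvWitness_remove_to_keep : List (List Int) × Int := ([[1, 2], [4, 5]], 10)

def Spec_remove_to_keep (idxs : List (List Int)) (total_obj : Int) (out : List (List Int)) : Prop := out = remove_to_keep_alt idxs total_obj
instance (idxs : List (List Int)) (total_obj : Int) (out : List (List Int)) : Decidable (Spec_remove_to_keep idxs total_obj out) := by unfold Spec_remove_to_keep; infer_instance

-- ===== CLAIM (what is proved, stated in full; the proofs are below) =====
def Claim_equal_remove_to_keep : Prop := ∀ (idxs : List (List Int)) (total_obj : Int), Dom_remove_to_keep idxs total_obj → Pre_remove_to_keep idxs total_obj → Spec_remove_to_keep idxs total_obj (remove_to_keep idxs total_obj)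

-- ===== LEMMAS AND PROOFS =====

-- reference recursion: emit [prev, s[0]] and carry s[1] as the next left endpoint
def pvRef (prev : Int) (idxs : List (List Int)) (total_obj : Int) : List (List Int) :=
  match idxs with
  | [] => [[prev, total_obj]]
  | s :: rest => [prev, PySem.List.pyGetD s 0 0] :: pvRef (PySem.List.pyGetD s 1 0) rest total_obj

-- A's middle loop, structurally
def pvMids : List (List Int) → List (List Int)
  | s :: t :: rest => [PySem.List.pyGetD s 1 0, PySem.List.pyGetD t 0 0] :: pvMids (t :: rest)
  | _ => []

-- pair-chunking of a flat list
def pvChunk2 : List Int → List (List Int)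
  | a :: b :: rest => [a, b] :: pvChunk2 rest
  | _ => []

theorem pvRange2 (k : Nat) :
    PySem.List.pyRange 0 ((2 * k : Nat) : Int) 2
      = (List.range k).map (fun j => ((2 * j : Nat) : Int)) := by
  rw [PySem.List.pyRange_of_pos _ _ (by norm_num)]
  rcases Nat.eq_zero_or_pos k with hk | hk
  · subst hk; simp
  · have hlt : (0 : Int) < ((2 * k : Nat) : Int) := by push_cast; omega
    rw [if_pos hlt]
    have hcnt : ((((2 * k : Nat) : Int) - 0 + 2 - 1) / 2).toNat = k := by push_cast; omega
    rw [hcnt]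
    apply List.map_congr_left
    intro j _
    push_cast; ring

theorem pvA_mid (idxs : List (List Int)) :
    (PySem.List.pyRange 0 ((idxs.length : Int) - 1) 1).map
      (fun i => [PySem.List.pyGetD (PySem.List.pyGetD idxs i []) 1 0,
                 PySem.List.pyGetD (PySem.List.pyGetD idxs (i + 1) []) 0 0])
    = pvMids idxs := by
  match idxs with
  | [] =>
      rw [PySem.List.pyRange_one_eq_nil (by simp)]
      simp [pvMids]
  | [s] =>
      rw [PySem.List.pyRange_one_eq_nil (by simp)]
      simp [pvMids]
  | s :: t :: rest =>
      have ih := pvA_mid (t :: rest)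
      rw [PySem.List.pyRange_one] at ih ⊢
      have h1 : ((((s :: t :: rest).length : Int) - 1) - 0).toNat = rest.length + 1 := by simp
      have h2 : ((((t :: rest).length : Int) - 1) - 0).toNat = rest.length := by simp
      rw [h1, List.range_succ_eq_map, List.map_cons, List.map_map]
      rw [h2] at ih
      simp only [pvMids]
      refine List.cons_eq_cons.mpr ⟨?_, ?_⟩
      · norm_num [PySem.List.pyGetD_zero, PySem.List.pyGetD_ofNat', List.getD]
      · rw [← ih]
        simp only [List.map_map]
        apply List.map_congr_left
        intro k _
        simp only [Function.comp]
        have e1 : (0 : Int) + ((Nat.succ k : Nat) : Int) = ((k + 1 : Nat) : Int) := by omega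
        have e2 : ((k + 1 : Nat) : Int) + 1 = ((k + 2 : Nat) : Int) := by push_cast; ring
        have e3 : (0 : Int) + ((k : Nat) : Int) = ((k : Nat) : Int) := by omega
        have e4 : ((k : Nat) : Int) + 1 = ((k + 1 : Nat) : Int) := by push_cast; ring
        simp only [e1, e2, e3, e4, PySem.List.pyGetD_natCast]
        simp [List.getD]

theorem pvA_ref (rest : List (List Int)) :
    ∀ (s : List Int) (prev total_obj : Int),
    ([prev, PySem.List.pyGetD s 0 0] :: pvMids (s :: rest)) ++
      [[PySem.List.pyGetD ((s :: rest).getLast (by simp)) 1 0, total_obj]]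
    = pvRef prev (s :: rest) total_obj := by
  induction rest with
  | nil => intro s prev total_obj; simp [pvMids, pvRef]
  | cons t rr ih =>
    intro s prev total_obj
    have h := ih t (PySem.List.pyGetD s 1 0) total_obj
    simp only [pvMids, pvRef, List.cons_append] at h ⊢
    rw [show (s :: t :: rr).getLast (by simp) = (t :: rr).getLast (by simp) from
      List.getLast_cons _]
    exact congrArg (List.cons [prev, PySem.List.pyGetD s 0 0]) h

theorem pvB_chunk (ps : List Int) (h2 : ps.length % 2 = 0) :
    (PySem.List.pyRange 0 ((ps.length : Int)) 2).map
      (fun i => [PySem.List.pyGetD ps i 0, PySem.List.pyGetD ps (i + 1) 0])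
    = pvChunk2 ps := by
  match ps with
  | [] => simp [pvChunk2, PySem.List.pyRange_of_pos _ _ (by norm_num : (0:Int) < 2)]
  | [a] => simp at h2
  | a :: b :: rest =>
    have hr : rest.length % 2 = 0 := by simp at h2; omega
    have ih := pvB_chunk rest hr
    obtain ⟨m, hm⟩ : ∃ m, rest.length = 2 * m := ⟨rest.length / 2, by omega⟩
    have hlen : (a :: b :: rest).length = 2 * (m + 1) := by simp; omega
    rw [hlen, pvRange2 (m + 1)]
    rw [hm, pvRange2 m] at ih
    rw [List.range_succ_eq_map, List.map_cons, List.map_map]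
    simp only [pvChunk2]
    refine List.cons_eq_cons.mpr ⟨?_, ?_⟩
    · norm_num [PySem.List.pyGetD_zero, PySem.List.pyGetD_ofNat', List.getD]
    · rw [← ih]
      simp only [List.map_map]
      apply List.map_congr_left
      intro k _
      simp only [Function.comp]
      have e1 : ((2 * (Nat.succ k) : Nat) : Int) = ((2 * k + 2 : Nat) : Int) := by push_cast; ring
      have e2 : ((2 * k + 2 : Nat) : Int) + 1 = ((2 * k + 3 : Nat) : Int) := by push_cast; ring
      have e4 : ((2 * k : Nat) : Int) + 1 = ((2 * k + 1 : Nat) : Int) := by push_cast; ring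
      simp only [e1, e2, e4, PySem.List.pyGetD_natCast]
      simp [List.getD]

theorem pvB_ref (idxs : List (List Int)) :
    ∀ (prev total_obj : Int),
    pvChunk2 (prev :: (idxs.flatMap (fun s => [PySem.List.pyGetD s 0 0, PySem.List.pyGetD s 1 0]) ++ [total_obj]))
    = pvRef prev idxs total_obj := by
  induction idxs with
  | nil => intro prev total_obj; simp [pvChunk2, pvRef]
  | cons s rest ih =>
    intro prev total_obj
    simp only [List.flatMap_cons, List.cons_append, List.append_assoc, pvChunk2, pvRef]
    exact congrArg (List.cons [prev, PySem.List.pyGetD s 0 0]) (ih (PySem.List.pyGetD s 1 0) total_obj)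

-- ===== VERDICT (by name: the statement is the Claim_ definition above) =====
theorem remove_to_keep_spec : Claim_equal_remove_to_keep := by
  intro idxs total_obj _ hpre
  obtain ⟨hne, -⟩ := hpre
  obtain ⟨s, rest, rfl⟩ := List.exists_cons_of_ne_nil hne
  unfold Spec_remove_to_keep remove_to_keep remove_to_keep_alt
  simp only [PySem.List.foldl_append_singleton_eq_map, PySem.List.foldl_append_eq_flatMap]
  rw [pvA_mid]
  rw [PySem.List.pyGetD_zero_cons, PySem.List.pyGetD_neg_one _ _ (by simp : s :: rest ≠ [])]
  have h2 : ((([0] ++ (s :: rest).flatMap (fun t => [PySem.List.pyGetD t 0 0, PySem.List.pyGetD t 1 0])) ++ [total_obj]).length) % 2 = 0 := by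
    simp; omega
  rw [pvB_chunk _ h2]
  simp only [List.cons_append, List.nil_append]
  rw [pvB_ref, ← pvA_ref]
  simp only [List.cons_append]
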